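-- pv_equiv track=rewrite | github.com/kubepanel-io/kubepanel-infra | modules/operator/main.py | determine_overall_phase
-- ===== SOURCE A (Python) =====
-- def determine_overall_phase(conditions: list, suspended: bool = False) -> tuple[str, str]:
--     """
--     Determine overall phase based on conditions.
--
--     Returns:
--         Tuple of (phase, message)
--     """
--     if suspended:
--         return ('Suspended', 'Domain is suspended')
--
--     if not conditions:
--         return ('Pending', 'Waiting for reconciliation')
--
--     # Check for any failed conditions
--     failed = [c for c in conditions if c['status'] == 'False']
--     if failed:
--         return ('Degraded', f"{failed[0]['type']}: {failed[0]['message']}")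
--
--     # Check for any unknown conditions
--     unknown = [c for c in conditions if c['status'] == 'Unknown']
--     if unknown:
--         return ('Provisioning', f"Waiting for {unknown[0]['type']}")
--
--     # All conditions are True
--     return ('Ready', 'All resources are healthy')
-- ===== SOURCE B (Python) =====
-- def determine_overall_phase(conditions: list, suspended: bool = False) -> tuple[str, str]:
--     if suspended:
--         return ('Suspended', 'Domain is suspended')
--     if not conditions:
--         return ('Pending', 'Waiting for reconciliation')
--     # Fold the verdict back-to-front: start from the all-healthy verdict and walk the
--     # conditions from the last to the first, each condition combining with the verdict
--     # of the suffix behind it.  A failed condition always overrides; an unknown one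
--     # overrides only a non-Degraded suffix verdict (failed-anywhere beats unknown).
--     verdict = ('Ready', 'All resources are healthy')
--     for c in reversed(conditions):
--         s = c['status']
--         if s == 'False':
--             verdict = ('Degraded', f"{c.get('type', '')}: {c.get('message', '')}")
--         elif s == 'Unknown' and verdict[0] != 'Degraded':
--             verdict = ('Provisioning', f"Waiting for {c.get('type', '')}")
--     return verdict
-- ===== Notes on version B (the rewrite author's own statement) =====
-- stated objective: alternative
-- what changed: Replaces A's two staged filtering passes (first take all failed, then all unknown) with a single backwards fold: the verdict is built back-to-front, each condition combining with the suffix's verdict, so the failed-over-unknown priority is resolved by inspecting the accumulated verdict's phase instead of by separate scans.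
import Mathlib
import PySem

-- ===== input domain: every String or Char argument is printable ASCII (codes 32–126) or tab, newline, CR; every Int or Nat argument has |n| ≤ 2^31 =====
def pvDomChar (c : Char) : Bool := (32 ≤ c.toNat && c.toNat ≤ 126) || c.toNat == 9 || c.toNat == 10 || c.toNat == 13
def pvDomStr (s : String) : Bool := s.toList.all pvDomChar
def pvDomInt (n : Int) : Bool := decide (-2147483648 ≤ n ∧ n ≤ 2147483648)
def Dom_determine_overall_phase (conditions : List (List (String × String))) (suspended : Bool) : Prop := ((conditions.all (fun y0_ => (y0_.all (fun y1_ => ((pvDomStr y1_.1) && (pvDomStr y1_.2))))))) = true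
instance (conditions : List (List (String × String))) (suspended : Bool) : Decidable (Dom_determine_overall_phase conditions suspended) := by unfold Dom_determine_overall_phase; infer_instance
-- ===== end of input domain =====

-- B replaces A's two staged filtering passes by one backwards fold that builds the
-- verdict back-to-front from the suffix (objective: alternative decomposition, same cost).

-- c[k] as first-match association lookup; 'none' = KeyError (excluded by Pre_);
-- pyItem flattens it to a String with default "" (= B's c.get(k, ''); for A's c[k] the
-- default only fires outside Pre_).
def pyItem? (c : List (String × String)) (k : String) : Option String :=
  (c.find? (fun kv => kv.1 == k)).map (·.2)

def pyItem (c : List (String × String)) (k : String) : String :=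
  (pyItem? c k).getD ""

-- ===== PORT A =====
def determine_overall_phase (conditions : List (List (String × String))) (suspended : Bool) : String × String :=
  if suspended then ("Suspended", "Domain is suspended")
  else if conditions = [] then ("Pending", "Waiting for reconciliation")
  else
    let failed := conditions.filter (fun c => pyItem c "status" == "False")
    match failed with
    | f :: _ => ("Degraded", pyItem f "type" ++ ": " ++ pyItem f "message")
    | [] =>
      let unknown := conditions.filter (fun c => pyItem c "status" == "Unknown")
      match unknown with
      | u :: _ => ("Provisioning", "Waiting for " ++ pyItem u "type")
      | [] => ("Ready", "All resources are healthy")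

-- ===== PORT B =====
-- one iteration of B's backwards loop: combine condition c with the verdict of the suffix behind it
def altStep (verdict : String × String) (c : List (String × String)) : String × String :=
  let s := pyItem c "status"
  if s == "False" then ("Degraded", pyItem c "type" ++ ": " ++ pyItem c "message")
  else if s == "Unknown" && !(verdict.1 == "Degraded") then
    ("Provisioning", "Waiting for " ++ pyItem c "type")
  else verdict

def determine_overall_phase_alt (conditions : List (List (String × String))) (suspended : Bool) : String × String :=
  if suspended then ("Suspended", "Domain is suspended")
  else if conditions = [] then ("Pending", "Waiting for reconciliation")
  else conditions.reverse.foldl altStep ("Ready", "All resources are healthy")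

-- ===== PRECONDITION & SPEC =====
-- Pre_ excludes exactly the inputs on which Python A raises KeyError: a condition missing
-- 'status', or the first failed condition missing 'type'/'message', or (with no failed one)
-- the first unknown condition missing 'type'.  Nothing A returns on is excluded.
def Pre_determine_overall_phase (conditions : List (List (String × String))) (suspended : Bool) : Prop :=
  suspended = true ∨ conditions = [] ∨
  ((∀ c ∈ conditions, (pyItem? c "status").isSome = true) ∧
   (∀ f ∈ (conditions.find? (fun c => pyItem c "status" == "False")).toList,
      (pyItem? f "type").isSome = true ∧ (pyItem? f "message").isSome = true) ∧
   (conditions.find? (fun c => pyItem c "status" == "False") = none →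
    ∀ u ∈ (conditions.find? (fun c => pyItem c "status" == "Unknown")).toList,
      (pyItem? u "type").isSome = true))

instance (conditions : List (List (String × String))) (suspended : Bool) : Decidable (Pre_determine_overall_phase conditions suspended) := by
  unfold Pre_determine_overall_phase; infer_instance

def pvWitness_determine_overall_phase : (List (List (String × String))) × Bool :=
  ([[("status", "True")]], false)

def Spec_determine_overall_phase (conditions : List (List (String × String))) (suspended : Bool) (out : String × String) : Prop := out = determine_overall_phase_alt conditions suspended
instance (conditions : List (List (String × String))) (suspended : Bool) (out : String × String) : Decidable (Spec_determine_overall_phase conditions suspended out) := by unfold Spec_determine_overall_phase; infer_instance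

-- ===== CLAIM (what is proved, stated in full; the proofs are below) =====
def Claim_equal_determine_overall_phase : Prop := ∀ (conditions : List (List (String × String))) (suspended : Bool), Dom_determine_overall_phase conditions suspended → Pre_determine_overall_phase conditions suspended → Spec_determine_overall_phase conditions suspended (determine_overall_phase conditions suspended)

-- ===== LEMMAS AND PROOFS =====

-- B's backwards fold computes: Degraded at the first failed condition, else Provisioning
-- at the first unknown one, else Ready.
theorem foldr_altStep (l : List (List (String × String))) :
    l.foldr (fun c v => altStep v c) ("Ready", "All resources are healthy") =
      match l.find? (fun c => pyItem c "status" == "False") with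
      | some f => ("Degraded", pyItem f "type" ++ ": " ++ pyItem f "message")
      | none =>
        match l.find? (fun c => pyItem c "status" == "Unknown") with
        | some u => ("Provisioning", "Waiting for " ++ pyItem u "type")
        | none => ("Ready", "All resources are healthy") := by
  induction l with
  | nil => rfl
  | cons c l ih =>
    rw [List.foldr_cons, ih]
    simp only [List.find?_cons, altStep]
    by_cases hF : (pyItem c "status" == "False") = true
    · simp [hF]
    · simp only [Bool.not_eq_true] at hF
      by_cases hU : (pyItem c "status" == "Unknown") = true
      · cases hf : l.find? (fun c => pyItem c "status" == "False") with
        | some f => simp [hF, hU, hf]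
        | none =>
          cases hu : l.find? (fun c => pyItem c "status" == "Unknown") with
          | some u => simp [hF, hU, hf, hu]
          | none => simp [hF, hU, hf, hu]
      · simp only [Bool.not_eq_true] at hU
        simp [hF, hU]

theorem head?_filter' (p : List (String × String) → Bool) (l : List (List (String × String))) :
    (l.filter p).head? = l.find? p := by
  induction l with
  | nil => rfl
  | cons c l ih =>
    by_cases h : p c = true
    · simp [List.find?_cons, h]
    · simp only [Bool.not_eq_true] at h
      simp [List.find?_cons, h, ih]

-- ===== VERDICT (by name: the statement is the Claim_ definition above) =====
theorem determine_overall_phase_spec : Claim_equal_determine_overall_phase := by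
  intro conditions suspended _ _
  unfold Spec_determine_overall_phase determine_overall_phase determine_overall_phase_alt
  by_cases hs : suspended = true
  · simp [hs]
  · simp only [Bool.not_eq_true] at hs
    by_cases he : conditions = []
    · simp [hs, he]
    · simp only [hs, he, if_false, Bool.false_eq_true]
      rw [List.foldl_reverse, foldr_altStep]
      have hF := head?_filter' (fun c => pyItem c "status" == "False") conditions
      have hU := head?_filter' (fun c => pyItem c "status" == "Unknown") conditions
      cases hf : conditions.filter (fun c => pyItem c "status" == "False") with
      | cons f _ =>
        rw [hf] at hF
        simp only [List.head?_cons] at hF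
        rw [← hF]
      | nil =>
        rw [hf] at hF
        simp only [List.head?_nil] at hF
        rw [← hF]
        cases hu : conditions.filter (fun c => pyItem c "status" == "Unknown") with
        | cons u _ =>
          rw [hu] at hU
          simp only [List.head?_cons] at hU
          rw [← hU]
        | nil =>
          rw [hu] at hU
          simp only [List.head?_nil] at hU
          rw [← hU]
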